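-- pv_equiv track=rewrite | github.com/Alexbokoff/roulette | test_bot.py | sector_number
-- ===== SOURCE A (Python) =====
-- def sector_number(duplicate_list, summ_list):
--     jeu_0 = [12, 35, 3, 26, 0, 32, 15]
--     voisins = [22, 18, 29, 7, 28, 19, 4, 21, 2, 25]
--     orphelins = [1, 20, 14, 31, 9, 17, 34, 6]
--     tiers = [27, 13, 36, 11, 30, 8, 23, 10, 5, 24, 16, 33]
--
--     list_jeu_0 = [0, 0]
--     list_voisins = [0, 0]
--     list_orphelins = [0, 0]
--     list_tiers = [0, 0]
--
--     for i_number in duplicate_list: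
--         for index1 in jeu_0:
--             if index1 == i_number:
--                 list_jeu_0[0] += 1
--                 for index in range(len(summ_list)):
--                     if index1 == summ_list[index][0]:
--                         list_jeu_0[1] += summ_list[index][1]
--                         break
--
--         for index2 in voisins:
--             if index2 == i_number:
--                 list_voisins[0] += 1
--                 for index in range(len(summ_list)):
--                     if index2 == summ_list[index][0]:
--                         list_voisins[1] += summ_list[index][1]
--                         break
--
--         for index3 in orphelins:
--             if index3 == i_number:
--                 list_orphelins[0] += 1
--                 for index in range(len(summ_list)):
--                     if index3 == summ_list[index][0]:
--                         list_orphelins[1] += summ_list[index][1]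
--                         break
--
--         for index4 in tiers:
--             if index4 == i_number:
--                 list_tiers[0] += 1
--                 for index in range(len(summ_list)):
--                     if index4 == summ_list[index][0]:
--                         list_tiers[1] += summ_list[index][1]
--                         break
--
--     return list_jeu_0, list_voisins, list_orphelins, list_tiers
-- ===== SOURCE B (Python) =====
-- def sector_number(duplicate_list, summ_list):
--     # One pass over summ_list builds a first-occurrence value map, one pass over
--     # duplicate_list classifies each number into its (disjoint) sector: O(n + m).
--     first = {}
--     for k, v in summ_list:
--         if k not in first:
--             first[k] = v
--
--     jeu_0 = frozenset((12, 35, 3, 26, 0, 32, 15))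
--     voisins = frozenset((22, 18, 29, 7, 28, 19, 4, 21, 2, 25))
--     orphelins = frozenset((1, 20, 14, 31, 9, 17, 34, 6))
--     tiers = frozenset((27, 13, 36, 11, 30, 8, 23, 10, 5, 24, 16, 33))
--
--     acc = [[0, 0], [0, 0], [0, 0], [0, 0]]
--     for n in duplicate_list:
--         if n in jeu_0:
--             s = 0
--         elif n in voisins:
--             s = 1
--         elif n in orphelins:
--             s = 2
--         elif n in tiers:
--             s = 3
--         else:
--             continue
--         acc[s][0] += 1
--         acc[s][1] += first.get(n, 0)
--     return acc[0], acc[1], acc[2], acc[3]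
-- ===== Notes on version B (the rewrite author's own statement) =====
-- stated objective: faster
-- what changed: Replaces the per-number rescan of all four sector lists and the inner linear scan of summ_list by a first-occurrence dict built once plus a single classification pass over duplicate_list.
import Mathlib
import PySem

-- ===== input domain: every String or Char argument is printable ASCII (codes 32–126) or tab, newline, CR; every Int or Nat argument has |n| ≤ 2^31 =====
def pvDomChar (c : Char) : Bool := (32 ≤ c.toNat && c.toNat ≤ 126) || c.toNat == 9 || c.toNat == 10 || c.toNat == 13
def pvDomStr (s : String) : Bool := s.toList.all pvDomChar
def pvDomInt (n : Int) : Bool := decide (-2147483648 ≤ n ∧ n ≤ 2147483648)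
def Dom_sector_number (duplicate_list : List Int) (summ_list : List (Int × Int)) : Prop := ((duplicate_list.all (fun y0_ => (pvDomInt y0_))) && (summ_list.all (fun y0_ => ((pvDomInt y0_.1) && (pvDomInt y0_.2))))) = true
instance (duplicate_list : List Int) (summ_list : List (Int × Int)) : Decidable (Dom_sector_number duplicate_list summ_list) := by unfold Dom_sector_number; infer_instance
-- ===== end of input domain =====

-- B replaces A's per-number rescans (four sector lists and a linear scan of summ_list per hit)
-- by a first-occurrence dict built once and a single classification pass (objective: faster).


-- ===== PORT A =====
-- inner 'for index in range(len(summ_list)): if x == summ_list[index][0]: acc += …; break'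
-- as the amount added: the first matching value, 0 when the scan falls through
def pvFirstSum (x : Int) : List (Int × Int) → Int
  | [] => 0
  | p :: rest => if p.1 == x then p.2 else pvFirstSum x rest

-- one 'for indexK in <sector>: if indexK == i_number: …' loop acting on its [count, sum] pair
def pvSectorStep (n : Int) (summ : List (Int × Int)) (sec : List Int) (p : Int × Int) : Int × Int :=
  sec.foldl (fun p x => if x == n then (p.1 + 1, p.2 + pvFirstSum x summ) else p) p

def sector_number (duplicate_list : List Int) (summ_list : List (Int × Int)) : List Int × List Int × List Int × List Int :=
  -- jeu_0 / voisins / orphelins / tiers are the four literal sector lists from the Python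
  let st := duplicate_list.foldl
    (fun (s : (Int × Int) × (Int × Int) × (Int × Int) × (Int × Int)) n =>
      (pvSectorStep n summ_list [12, 35, 3, 26, 0, 32, 15] s.1,
       pvSectorStep n summ_list [22, 18, 29, 7, 28, 19, 4, 21, 2, 25] s.2.1,
       pvSectorStep n summ_list [1, 20, 14, 31, 9, 17, 34, 6] s.2.2.1,
       pvSectorStep n summ_list [27, 13, 36, 11, 30, 8, 23, 10, 5, 24, 16, 33] s.2.2.2))
    ((0, 0), (0, 0), (0, 0), (0, 0))
  ([st.1.1, st.1.2], [st.2.1.1, st.2.1.2], [st.2.2.1.1, st.2.2.1.2], [st.2.2.2.1, st.2.2.2.2])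

-- ===== PORT B =====
-- 'first = {}; for k, v in summ_list: if k not in first: first[k] = v'
def pvFirstDict (summ : List (Int × Int)) : PySem.Dict Int Int :=
  summ.foldl (fun d p => if d.contains p.1 then d else d.insert p.1 p.2) PySem.Dict.empty

def sector_number_alt (duplicate_list : List Int) (summ_list : List (Int × Int)) : List Int × List Int × List Int × List Int :=
  let first := pvFirstDict summ_list
  let st := duplicate_list.foldl
    (fun (s : (Int × Int) × (Int × Int) × (Int × Int) × (Int × Int)) n =>
      if ([12, 35, 3, 26, 0, 32, 15] : List Int).contains n then ((s.1.1 + 1, s.1.2 + first.getD n 0), s.2)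
      else if ([22, 18, 29, 7, 28, 19, 4, 21, 2, 25] : List Int).contains n then (s.1, (s.2.1.1 + 1, s.2.1.2 + first.getD n 0), s.2.2)
      else if ([1, 20, 14, 31, 9, 17, 34, 6] : List Int).contains n then (s.1, s.2.1, (s.2.2.1.1 + 1, s.2.2.1.2 + first.getD n 0), s.2.2.2)
      else if ([27, 13, 36, 11, 30, 8, 23, 10, 5, 24, 16, 33] : List Int).contains n then (s.1, s.2.1, s.2.2.1, (s.2.2.2.1 + 1, s.2.2.2.2 + first.getD n 0))
      else s)
    ((0, 0), (0, 0), (0, 0), (0, 0))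
  ([st.1.1, st.1.2], [st.2.1.1, st.2.1.2], [st.2.2.1.1, st.2.2.1.2], [st.2.2.2.1, st.2.2.2.2])

-- ===== PRECONDITION & SPEC =====
def Spec_sector_number (duplicate_list : List Int) (summ_list : List (Int × Int)) (out : List Int × List Int × List Int × List Int) : Prop := out = sector_number_alt duplicate_list summ_list
instance (duplicate_list : List Int) (summ_list : List (Int × Int)) (out : List Int × List Int × List Int × List Int) : Decidable (Spec_sector_number duplicate_list summ_list out) := by unfold Spec_sector_number; infer_instance

-- ===== CLAIM (what is proved, stated in full; the proofs are below) =====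
def Claim_equal_sector_number : Prop := ∀ (duplicate_list : List Int) (summ_list : List (Int × Int)), Dom_sector_number duplicate_list summ_list → Spec_sector_number duplicate_list summ_list (sector_number duplicate_list summ_list)

-- ===== LEMMAS AND PROOFS =====

-- B's first-occurrence dict looks up exactly what A's break-scan adds
theorem pvFirstDict_getD (summ : List (Int × Int)) (d : PySem.Dict Int Int) (n : Int) :
    (summ.foldl (fun d p => if d.contains p.1 then d else d.insert p.1 p.2) d).getD n 0
      = match d.get? n with
        | some v => v
        | none => pvFirstSum n summ := by
  induction summ generalizing d with
  | nil =>
    simp only [List.foldl_nil, PySem.Dict.getD_eq_get?_getD]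
    cases d.get? n <;> simp [pvFirstSum]
  | cons p rest ih =>
    obtain ⟨k, v⟩ := p
    simp only [List.foldl_cons]
    by_cases hc : d.contains k = true
    · rw [if_pos hc, ih]
      cases hG : d.get? n with
      | some w => rfl
      | none =>
        have hkn : ¬ (k = n) := by
          intro h; subst h
          rw [PySem.Dict.contains_eq_isSome_get?, hG] at hc; simp at hc
        simp [pvFirstSum, hkn]
    · rw [if_neg hc, ih]
      by_cases hkn : n = k
      · subst hkn
        have hG : d.get? n = none := by
          rw [PySem.Dict.get?_eq_none_iff_contains]
          simpa using hc
        simp [PySem.Dict.get?_insert_self, hG, pvFirstSum]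
      · rw [PySem.Dict.get?_insert_of_ne _ _ hkn]
        cases hG : d.get? n with
        | some w => rfl
        | none =>
          have hk : ¬ (k == n) = true := by
            simp only [beq_iff_eq]; exact fun h => hkn h.symm
          simp [pvFirstSum, hk]

theorem pvSectorStep_no_match (n : Int) (summ : List (Int × Int)) (L : List Int)
    (h : n ∉ L) (p : Int × Int) :
    pvSectorStep n summ L p = p := by
  induction L generalizing p with
  | nil => rfl
  | cons a L ih =>
    have ha : ¬ (a == n) = true := by
      simp only [beq_iff_eq]; rintro rfl; exact h (List.mem_cons_self ..)
    simp only [pvSectorStep, List.foldl_cons, ha, Bool.false_eq_true, if_false] at *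
    exact ih (fun hm => h (List.mem_cons_of_mem _ hm)) p

-- A's scan of a duplicate-free sector list = B's membership test
theorem pvSectorStep_eq (n : Int) (summ : List (Int × Int)) (L : List Int)
    (hnd : L.Nodup) (p : Int × Int) :
    pvSectorStep n summ L p = if n ∈ L then (p.1 + 1, p.2 + pvFirstSum n summ) else p := by
  induction L generalizing p with
  | nil => simp [pvSectorStep]
  | cons a L ih =>
    rcases List.nodup_cons.mp hnd with ⟨hna, hLnd⟩
    by_cases han : a = n
    · subst han
      simp only [pvSectorStep, List.foldl_cons, beq_self_eq_true, if_true]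
      have hnm := pvSectorStep_no_match a summ L hna (p.1 + 1, p.2 + pvFirstSum a summ)
      simp only [pvSectorStep] at hnm
      rw [hnm]
      simp
    · have ha : ¬ (a == n) = true := by simp [han]
      simp only [pvSectorStep, List.foldl_cons, ha, Bool.false_eq_true, if_false] at *
      rw [ih hLnd p]
      have hne : ¬ n = a := fun h => han h.symm
      simp [hne]

-- the per-element transition functions of the two folds coincide
theorem pvStep_eq (summ : List (Int × Int))
    (s : (Int × Int) × (Int × Int) × (Int × Int) × (Int × Int)) (n : Int) :
      (pvSectorStep n summ [12, 35, 3, 26, 0, 32, 15] s.1,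
       pvSectorStep n summ [22, 18, 29, 7, 28, 19, 4, 21, 2, 25] s.2.1,
       pvSectorStep n summ [1, 20, 14, 31, 9, 17, 34, 6] s.2.2.1,
       pvSectorStep n summ [27, 13, 36, 11, 30, 8, 23, 10, 5, 24, 16, 33] s.2.2.2)
    = (if ([12, 35, 3, 26, 0, 32, 15] : List Int).contains n then ((s.1.1 + 1, s.1.2 + (pvFirstDict summ).getD n 0), s.2)
      else if ([22, 18, 29, 7, 28, 19, 4, 21, 2, 25] : List Int).contains n then (s.1, (s.2.1.1 + 1, s.2.1.2 + (pvFirstDict summ).getD n 0), s.2.2)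
      else if ([1, 20, 14, 31, 9, 17, 34, 6] : List Int).contains n then (s.1, s.2.1, (s.2.2.1.1 + 1, s.2.2.1.2 + (pvFirstDict summ).getD n 0), s.2.2.2)
      else if ([27, 13, 36, 11, 30, 8, 23, 10, 5, 24, 16, 33] : List Int).contains n then (s.1, s.2.1, s.2.2.1, (s.2.2.2.1 + 1, s.2.2.2.2 + (pvFirstDict summ).getD n 0))
      else s) := by
  have hfd : (pvFirstDict summ).getD n 0 = pvFirstSum n summ := by
    have := pvFirstDict_getD summ PySem.Dict.empty n
    simpa [pvFirstDict, PySem.Dict.get?_empty] using this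
  rw [hfd,
    pvSectorStep_eq n summ [12, 35, 3, 26, 0, 32, 15] (by decide) s.1,
    pvSectorStep_eq n summ [22, 18, 29, 7, 28, 19, 4, 21, 2, 25] (by decide) s.2.1,
    pvSectorStep_eq n summ [1, 20, 14, 31, 9, 17, 34, 6] (by decide) s.2.2.1,
    pvSectorStep_eq n summ [27, 13, 36, 11, 30, 8, 23, 10, 5, 24, 16, 33] (by decide) s.2.2.2]
  simp only [List.contains_iff_mem]
  by_cases h1 : n ∈ ([12, 35, 3, 26, 0, 32, 15] : List Int)
  · have h2 : n ∉ ([22, 18, 29, 7, 28, 19, 4, 21, 2, 25] : List Int) := by fin_cases h1 <;> decide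
    have h3 : n ∉ ([1, 20, 14, 31, 9, 17, 34, 6] : List Int) := by fin_cases h1 <;> decide
    have h4 : n ∉ ([27, 13, 36, 11, 30, 8, 23, 10, 5, 24, 16, 33] : List Int) := by fin_cases h1 <;> decide
    simp [h1, h2, h3, h4]
  · by_cases h2 : n ∈ ([22, 18, 29, 7, 28, 19, 4, 21, 2, 25] : List Int)
    · have h3 : n ∉ ([1, 20, 14, 31, 9, 17, 34, 6] : List Int) := by fin_cases h2 <;> decide
      have h4 : n ∉ ([27, 13, 36, 11, 30, 8, 23, 10, 5, 24, 16, 33] : List Int) := by fin_cases h2 <;> decide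
      simp [h1, h2, h3, h4]
    · by_cases h3 : n ∈ ([1, 20, 14, 31, 9, 17, 34, 6] : List Int)
      · have h4 : n ∉ ([27, 13, 36, 11, 30, 8, 23, 10, 5, 24, 16, 33] : List Int) := by fin_cases h3 <;> decide
        simp [h1, h2, h3, h4]
      · by_cases h4 : n ∈ ([27, 13, 36, 11, 30, 8, 23, 10, 5, 24, 16, 33] : List Int) <;> simp [h1, h2, h3, h4]

-- ===== VERDICT (by name: the statement is the Claim_ definition above) =====
theorem sector_number_spec : Claim_equal_sector_number := by
  intro duplicate_list summ_list _
  unfold Spec_sector_number sector_number sector_number_alt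
  have hstep := funext (fun s => funext (fun n => pvStep_eq summ_list s n))
  rw [hstep]
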